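-- pv_equiv track=rewrite | github.com/abvblo/tcg-ebay-ai-uploader | src/api/openai_titles.py | _get_key_characteristics
-- ===== SOURCE A (Python) =====
-- from typing import Any, Dict, List
--
-- def _get_key_characteristics(characteristics: List[str]) -> str:
--     """Get most valuable unique characteristic for search"""
--     if not characteristics:
--         return ""
--
--     # Priority order for characteristics
--     priority_order = [
--         "1st edition",
--         "shadowless",
--         "alpha",
--         "beta",
--         "unlimited",
--         "promo",
--         "staff",
--         "championship",
--         "tournament",
--         "pre-release",
--         "error",
--         "misprint",
--         "test card",
--         "stamped",
--     ]
--
--     for priority_char in priority_order: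
--         for char in characteristics:
--             if priority_char in char.lower():
--                 return char
--
--     return characteristics[0] if characteristics else ""
-- ===== SOURCE B (Python) =====
-- from typing import List
--
-- def _get_key_characteristics(characteristics: List[str]) -> str:
--     """Get most valuable unique characteristic for search (single-pass argmin by priority rank)."""
--     if not characteristics:
--         return ""
--
--     priority_order = [
--         "1st edition",
--         "shadowless",
--         "alpha",
--         "beta",
--         "unlimited",
--         "promo",
--         "staff",
--         "championship",
--         "tournament",
--         "pre-release",
--         "error",
--         "misprint",
--         "test card",
--         "stamped",
--     ]
--     sentinel = len(priority_order)
--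
--     def rank(char: str) -> int:
--         low = char.lower()
--         return next((i for i, p in enumerate(priority_order) if p in low), sentinel)
--
--     best_char = characteristics[0]
--     best_rank = rank(best_char)
--     for char in characteristics[1:]:
--         r = rank(char)
--         if r < best_rank:
--             best_char, best_rank = char, r
--     return best_char
-- ===== Notes on version B (the rewrite author's own statement) =====
-- stated objective: alternative
-- what changed: Replaces the nested priority-by-priority scan (for each of 14 priorities, rescan all characteristics) with a single argmin pass over the characteristics tracking each item's priority rank (first-seen wins ties, sentinel rank falls back to the first item).
import Mathlib
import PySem

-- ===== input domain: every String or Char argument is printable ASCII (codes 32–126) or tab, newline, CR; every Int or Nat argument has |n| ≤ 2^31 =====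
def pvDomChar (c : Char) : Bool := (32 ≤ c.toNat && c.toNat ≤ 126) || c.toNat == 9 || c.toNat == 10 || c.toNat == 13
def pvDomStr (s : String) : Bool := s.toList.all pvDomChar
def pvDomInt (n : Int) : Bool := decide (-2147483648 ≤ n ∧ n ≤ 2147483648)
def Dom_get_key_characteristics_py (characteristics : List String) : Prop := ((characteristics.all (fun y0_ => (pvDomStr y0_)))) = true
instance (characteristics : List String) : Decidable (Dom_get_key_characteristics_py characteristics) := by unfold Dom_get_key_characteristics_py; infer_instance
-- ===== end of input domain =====

-- B replaces A's nested priority-by-priority rescans with a single argmin-by-rank pass over the characteristics (objective: alternative decomposition, same cost).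

-- shared literal constant (identical in both Python sources)
def pvPriorities : List String :=
  ["1st edition", "shadowless", "alpha", "beta", "unlimited", "promo", "staff",
   "championship", "tournament", "pre-release", "error", "misprint", "test card", "stamped"]

-- 'priority_char in char.lower()'
def pvHit (p c : String) : Bool := PySem.Str.isIn p (PySem.Str.lower c)

-- ===== PORT A =====
-- outer loop 'for priority_char in priority_order'; inner 'for char in characteristics: if …: return char' = find?
def pvAOuter (chars : List String) : List String → Option String
  | [] => none
  | p :: ps =>
    match chars.find? (fun c => pvHit p c) with
    | some c => some c
    | none => pvAOuter chars ps

def get_key_characteristics_py (characteristics : List String) : String :=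
  match characteristics with
  | [] => ""
  | c0 :: _ =>
    match pvAOuter characteristics pvPriorities with
    | some c => c
    | none => c0

-- ===== PORT B =====
-- rank(char): first matching priority index, sentinel = len(priority_order) when none matches
def pvRank (c : String) : Nat :=
  (pvPriorities.findIdx? (fun p => pvHit p c)).getD pvPriorities.length

def get_key_characteristics_py_alt (characteristics : List String) : String :=
  match characteristics with
  | [] => ""
  | c0 :: rest =>
    (rest.foldl (fun best c =>
        let r := pvRank c
        if r < best.2 then (c, r) else best) (c0, pvRank c0)).1

-- ===== PRECONDITION & SPEC =====
def Spec_get_key_characteristics_py (characteristics : List String) (out : String) : Prop := out = get_key_characteristics_py_alt characteristics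
instance (characteristics : List String) (out : String) : Decidable (Spec_get_key_characteristics_py characteristics out) := by unfold Spec_get_key_characteristics_py; infer_instance

-- ===== CLAIM (what is proved, stated in full; the proofs are below) =====
def Claim_equal_get_key_characteristics_py : Prop := ∀ (characteristics : List String), Dom_get_key_characteristics_py characteristics → Spec_get_key_characteristics_py characteristics (get_key_characteristics_py characteristics)

-- ===== LEMMAS AND PROOFS =====

-- rank with respect to an arbitrary priority list (generalizes pvRank for the induction)
def pvRk (ps : List String) (c : String) : Nat :=
  (ps.findIdx? (fun p => pvHit p c)).getD ps.length

-- B's fold step, parametrized by the rank function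
def pvStep (rank : String → Nat) (best : String × Nat) (c : String) : String × Nat :=
  let r := rank c
  if r < best.2 then (c, r) else best

theorem pvRk_nil (c : String) : pvRk [] c = 0 := rfl

theorem pvRk_cons (p : String) (ps : List String) (c : String) :
    pvRk (p :: ps) c = if pvHit p c then 0 else pvRk ps c + 1 := by
  unfold pvRk
  by_cases h : pvHit p c
  · simp [List.findIdx?_cons, h]
  · simp only [List.findIdx?_cons, h, if_neg, Bool.false_eq_true, not_false_iff]
    cases hx : List.findIdx? (fun p => pvHit p c) ps <;> simp [List.length_cons]

-- if nothing beats the accumulator, the fold keeps it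
theorem pvFold_min (rank : String → Nat) :
    ∀ (l : List String) (b : String × Nat), (∀ c ∈ l, b.2 ≤ rank c) →
      l.foldl (pvStep rank) b = b := by
  intro l
  induction l with
  | nil => intro b _; rfl
  | cons x t ih =>
    intro b h
    have hx : ¬ rank x < b.2 := not_lt.mpr (h x (by simp))
    simp only [List.foldl_cons, pvStep, hx, if_false]
    exact ih b (fun c hc => h c (by simp [hc]))

-- a rank-0 element: the fold returns the first one (accumulator still positive)
theorem pvFold_hit (p : String) (ps : List String) :
    ∀ (l : List String) (b : String × Nat) (c : String), 0 < b.2 →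
      l.find? (fun x => pvHit p x) = some c →
      (l.foldl (pvStep (pvRk (p :: ps))) b).1 = c := by
  intro l
  induction l with
  | nil => intro b c _ h; simp at h
  | cons x t ih =>
    intro b c hb hf
    by_cases hx : pvHit p x
    · have hc : c = x := by
        rw [List.find?_cons_of_pos hx] at hf; exact (Option.some.inj hf).symm
      subst hc
      have h0 : pvRk (p :: ps) c = 0 := by rw [pvRk_cons, if_pos hx]
      simp only [List.foldl_cons, pvStep, h0, if_pos hb]
      rw [pvFold_min _ t (c, 0) (fun _ _ => Nat.zero_le _)]
    · rw [List.find?_cons_of_neg (by simp [hx])] at hf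
      have hxr : pvRk (p :: ps) x = pvRk ps x + 1 := by rw [pvRk_cons, if_neg (by simp [hx])]
      simp only [List.foldl_cons, pvStep]
      by_cases hlt : pvRk (p :: ps) x < b.2
      · rw [if_pos hlt]
        exact ih (x, pvRk (p :: ps) x) c (by simp [hxr]) hf
      · rw [if_neg hlt]
        exact ih b c hb hf

-- shifting every rank by one does not change the argmin (strict-< tie-breaking preserved)
theorem pvFold_shift (rank1 rank2 : String → Nat) :
    ∀ (l : List String) (x : String) (r : Nat), (∀ c ∈ l, rank1 c = rank2 c + 1) →
      l.foldl (pvStep rank1) (x, r + 1)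
        = ((l.foldl (pvStep rank2) (x, r)).1, (l.foldl (pvStep rank2) (x, r)).2 + 1) := by
  intro l
  induction l with
  | nil => intro x r _; rfl
  | cons c t ih =>
    intro x r h
    have hc : rank1 c = rank2 c + 1 := h c (by simp)
    have ht : ∀ d ∈ t, rank1 d = rank2 d + 1 := fun d hd => h d (by simp [hd])
    simp only [List.foldl_cons, pvStep, hc]
    by_cases hlt : rank2 c < r
    · rw [if_pos (by omega), if_pos hlt]
      exact ih c (rank2 c) ht
    · rw [if_neg (by omega), if_neg hlt]
      exact ih x r ht

-- main correspondence, generalized over the priority list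
theorem pvMain (c0 : String) (l : List String) :
    ∀ (ps : List String),
      (match pvAOuter (c0 :: l) ps with | some c => c | none => c0)
        = (l.foldl (pvStep (pvRk ps)) (c0, pvRk ps c0)).1 := by
  intro ps
  induction ps with
  | nil =>
    rw [pvFold_min _ l (c0, pvRk [] c0) (fun c _ => by simp [pvRk_nil])]
    rfl
  | cons p ps ih =>
    show (match (match (c0 :: l).find? (fun c => pvHit p c) with
                 | some c => some c
                 | none => pvAOuter (c0 :: l) ps) with
          | some c => c | none => c0) = _
    cases hf : (c0 :: l).find? (fun c => pvHit p c) with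
    | some c =>
      simp only
      by_cases h0 : pvHit p c0
      · have hc : c = c0 := by
          rw [List.find?_cons_of_pos h0] at hf; exact (Option.some.inj hf).symm
        subst hc
        have h00 : pvRk (p :: ps) c = 0 := by rw [pvRk_cons, if_pos h0]
        rw [h00, pvFold_min _ l (c, 0) (fun _ _ => Nat.zero_le _)]
      · rw [List.find?_cons_of_neg (by simp [h0])] at hf
        have hr0 : pvRk (p :: ps) c0 = pvRk ps c0 + 1 := by rw [pvRk_cons, if_neg (by simp [h0])]
        rw [hr0, (pvFold_hit p ps l (c0, pvRk ps c0 + 1) c (by simp) hf)]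
    | none =>
      simp only
      have hnone : ∀ c ∈ c0 :: l, ¬ pvHit p c = true := by
        intro c hc
        exact List.find?_eq_none.mp hf c hc
      have hsh : ∀ c ∈ l, pvRk (p :: ps) c = pvRk ps c + 1 := by
        intro c hc
        rw [pvRk_cons, if_neg (hnone c (by simp [hc]))]
      have h0 : pvRk (p :: ps) c0 = pvRk ps c0 + 1 := by
        rw [pvRk_cons, if_neg (hnone c0 (by simp))]
      rw [h0, pvFold_shift (pvRk (p :: ps)) (pvRk ps) l c0 (pvRk ps c0) hsh]
      exact ih

-- ===== VERDICT (by name: the statement is the Claim_ definition above) =====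
theorem get_key_characteristics_py_spec : Claim_equal_get_key_characteristics_py := by
  intro characteristics _
  unfold Spec_get_key_characteristics_py
  cases characteristics with
  | nil => rfl
  | cons c0 l =>
    have h := pvMain c0 l pvPriorities
    simpa [get_key_characteristics_py, get_key_characteristics_py_alt, pvStep,
           (show pvRk pvPriorities = pvRank from rfl)] using h
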